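-- pv_equiv track=rewrite | github.com/b3nn-y/Zestober | Zestober-28/zest-28.py | containsNegativePair
-- ===== SOURCE A (Python) =====
-- def containsNegativePair(List,i):
--     l= len(List)
--     while i<l-1:
--         if List[i] + List[i+1] ==0:
--             return True
--         else:
--             return containsNegativePair(List,i+1)
--     return False
-- ===== SOURCE B (Python) =====
-- def containsNegativePair(List, i):
--     for j in range(i, len(List) - 1):
--         if List[j] + List[j + 1] == 0:
--             return True
--     return False
-- ===== Notes on version B (the rewrite author's own statement) =====
-- stated objective: idiomatic
-- what changed: Replaces A's per-index tail recursion wrapped in a degenerate while-loop by a plain iterative for-loop over range(i, len(List)-1) with early return.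
import Mathlib
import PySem

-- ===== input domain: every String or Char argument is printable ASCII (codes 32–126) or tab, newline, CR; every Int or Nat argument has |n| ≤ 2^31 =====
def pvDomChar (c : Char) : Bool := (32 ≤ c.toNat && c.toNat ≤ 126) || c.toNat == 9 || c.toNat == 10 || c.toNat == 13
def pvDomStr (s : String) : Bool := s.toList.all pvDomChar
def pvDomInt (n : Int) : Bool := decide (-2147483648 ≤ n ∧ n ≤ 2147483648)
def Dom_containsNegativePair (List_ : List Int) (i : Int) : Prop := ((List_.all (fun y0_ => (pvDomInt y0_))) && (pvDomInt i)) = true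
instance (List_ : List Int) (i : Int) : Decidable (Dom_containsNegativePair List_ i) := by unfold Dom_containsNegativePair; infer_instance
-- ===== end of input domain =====

-- B replaces A's per-index tail recursion (inside a degenerate while loop) by a plain
-- iterative scan over range(i, len(List)-1) with early exit (objective: idiomatic).

-- ===== PORT A =====
-- A: while i < l-1 { if List[i]+List[i+1] == 0 return True else return recurse(i+1) }; return False.
-- The while body always returns, so it is one if; out-of-range indexing (IndexError) yields false here
-- (those inputs are excluded by Pre_).
def containsNegativePair (List_ : List Int) (i : Int) : Bool :=
  if _h : i < (List_.length : Int) - 1 then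
    match PySem.List.pyGet? List_ i, PySem.List.pyGet? List_ (i + 1) with
    | some a, some b => if a + b == 0 then true else containsNegativePair List_ (i + 1)
    | _, _ => false
  else false
termination_by ((List_.length : Int) - 1 - i).toNat
decreasing_by omega

-- ===== PORT B =====
-- B: for j in range(i, len(List)-1): if List[j]+List[j+1] == 0: return True; return False.
-- The for-loop with early `return True` is `.any`; IndexError yields false (excluded by Pre_).
def containsNegativePair_alt (List_ : List Int) (i : Int) : Bool :=
  (PySem.List.pyRange i ((List_.length : Int) - 1) 1).any (fun j =>
    match PySem.List.pyGet? List_ j, PySem.List.pyGet? List_ (j + 1) with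
    | none, _ => false
    | _, none => false
    | some a, some b => a + b == 0)

-- ===== PRECONDITION & SPEC =====
-- Pre_ excludes exactly the inputs where A raises IndexError: a start index i below -len(List)
-- that still enters the loop (i < len-1). B raises identically there.
def Pre_containsNegativePair (List_ : List Int) (i : Int) : Prop :=
  ¬ (i < -(List_.length : Int) ∧ i < (List_.length : Int) - 1)
instance (List_ : List Int) (i : Int) : Decidable (Pre_containsNegativePair List_ i) := by
  unfold Pre_containsNegativePair; infer_instance

def pvWitness_containsNegativePair : List Int × Int := ([3, -3, 5], 0)

def Spec_containsNegativePair (List_ : List Int) (i : Int) (out : Bool) : Prop := out = containsNegativePair_alt List_ i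
instance (List_ : List Int) (i : Int) (out : Bool) : Decidable (Spec_containsNegativePair List_ i out) := by unfold Spec_containsNegativePair; infer_instance

-- ===== CLAIM (what is proved, stated in full; the proofs are below) =====
def Claim_equal_containsNegativePair : Prop := ∀ (List_ : List Int) (i : Int), Dom_containsNegativePair List_ i → Pre_containsNegativePair List_ i → Spec_containsNegativePair List_ i (containsNegativePair List_ i)

-- ===== LEMMAS AND PROOFS =====

theorem cnp_eq (List_ : List Int) (i : Int)
    (hpre : Pre_containsNegativePair List_ i) :
    containsNegativePair List_ i = containsNegativePair_alt List_ i := by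
  unfold Pre_containsNegativePair at hpre
  by_cases h : i < (List_.length : Int) - 1
  · have hge : -(List_.length : Int) ≤ i := by omega
    clear hpre
    -- induction on the remaining length of the scan
    generalize hm : ((List_.length : Int) - 1 - i).toNat = m
    induction m generalizing i with
    | zero => omega
    | succ n ih =>
      obtain ⟨a, h1⟩ : ∃ a, PySem.List.pyGet? List_ i = some a := by
        rcases hv : PySem.List.pyGet? List_ i with _ | a
        · rw [PySem.List.pyGet?_eq_none_iff] at hv
          exact absurd ⟨by omega, by omega⟩ hv
        · exact ⟨a, rfl⟩
      obtain ⟨b, h2⟩ : ∃ b, PySem.List.pyGet? List_ (i + 1) = some b := by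
        rcases hv : PySem.List.pyGet? List_ (i + 1) with _ | b
        · rw [PySem.List.pyGet?_eq_none_iff] at hv
          exact absurd ⟨by omega, by omega⟩ hv
        · exact ⟨b, rfl⟩
      rw [containsNegativePair, containsNegativePair_alt,
        PySem.List.pyRange_one_cons h, List.any_cons]
      rw [dif_pos h, h1, h2]
      by_cases hz : a + b = 0
      · simp [hz]
      · have hb : ((a + b == 0) : Bool) = false := by simpa using hz
        simp only [hb, Bool.false_or, if_false, Bool.false_eq_true]
        show containsNegativePair List_ (i + 1) = containsNegativePair_alt List_ (i + 1)
        by_cases h' : i + 1 < (List_.length : Int) - 1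
        · exact ih (i + 1) h' (by omega) (by omega)
        · rw [containsNegativePair, containsNegativePair_alt,
            dif_neg h', PySem.List.pyRange_one_eq_nil (by omega)]
          simp
  · rw [containsNegativePair, containsNegativePair_alt,
      dif_neg h, PySem.List.pyRange_one_eq_nil (by omega)]
    simp

-- ===== VERDICT (by name: the statement is the Claim_ definition above) =====
theorem containsNegativePair_spec : Claim_equal_containsNegativePair := by
  intro List_ i _ hpre
  unfold Spec_containsNegativePair
  exact cnp_eq List_ i hpre
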